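-- pv_equiv track=rewrite | github.com/ky0in/pg | zkouska2.py | spocitej_statistiku
-- ===== SOURCE A (Python) =====
-- def spocitej_statistiku(text):
--     pocet_radku = 0
--     pocet_slov = 0
--     pocet_znaku = 0
--
--     if text == '':
--         return 0, 0, 0
--
--     for znak in text:
--         pocet_znaku += 1
--
--     pocet_radku = 1
--     for znak in text:
--         if znak == "\n":
--             pocet_radku += 1
--
--     slova = text.split()
--     for _ in slova:
--         pocet_slov += 1
--
--
--
--     # ZDE DOPLŇTE VÁŠ KÓD
--
--     return pocet_radku, pocet_slov, pocet_znaku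
-- ===== SOURCE B (Python) =====
-- def spocitej_statistiku(text):
--     if text == '':
--         return 0, 0, 0
--     pocet_znaku = 0
--     pocet_radku = 1
--     pocet_slov = 0
--     in_word = False
--     for znak in text:
--         pocet_znaku += 1
--         if znak == "\n":
--             pocet_radku += 1
--         if znak.isspace():
--             in_word = False
--         else:
--             if not in_word:
--                 pocet_slov += 1
--             in_word = True
--     return pocet_radku, pocet_slov, pocet_znaku
-- ===== Notes on version B (the rewrite author's own statement) =====
-- stated objective: alternative
-- what changed: Replaced A's three separate passes (char loop, newline loop, split()-then-count loop) with a single loop over the characters maintaining three counters and an in-word flag that reproduces str.split() word boundaries.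
import Mathlib
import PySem

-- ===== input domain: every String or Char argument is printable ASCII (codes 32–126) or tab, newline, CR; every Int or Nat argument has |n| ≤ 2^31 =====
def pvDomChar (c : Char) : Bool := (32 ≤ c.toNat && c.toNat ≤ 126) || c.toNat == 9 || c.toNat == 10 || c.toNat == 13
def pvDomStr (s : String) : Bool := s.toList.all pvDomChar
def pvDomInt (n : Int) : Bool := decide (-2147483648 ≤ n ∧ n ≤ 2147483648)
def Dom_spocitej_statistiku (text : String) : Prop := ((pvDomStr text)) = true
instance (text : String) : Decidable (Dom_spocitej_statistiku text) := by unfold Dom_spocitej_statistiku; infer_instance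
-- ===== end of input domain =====

-- B replaces A's three separate passes by one loop with three counters and an in-word flag (same cost, different decomposition).

-- ===== PORT A =====
def spocitej_statistiku (text : String) : Int × Int × Int :=
  if text == "" then (0, 0, 0)
  else
    let pocet_znaku : Int := text.toList.foldl (fun acc _ => acc + 1) 0
    let pocet_radku : Int := text.toList.foldl (fun acc znak => if znak == '\n' then acc + 1 else acc) 1
    let slova := PySem.Str.split₀ text
    let pocet_slov : Int := slova.foldl (fun acc _ => acc + 1) 0
    (pocet_radku, pocet_slov, pocet_znaku)

-- ===== PORT B =====
-- one loop step: chars += 1; lines += 1 on '\n'; words += 1 on a whitespace→non-whitespace transition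
def pvStepB (st : Int × Int × Int × Bool) (znak : Char) : Int × Int × Int × Bool :=
  let z := st.1 + 1
  let r := if znak == '\n' then st.2.1 + 1 else st.2.1
  if PySem.Chars.isspace znak then (z, r, st.2.2.1, false)
  else if st.2.2.2 then (z, r, st.2.2.1, true)
  else (z, r, st.2.2.1 + 1, true)

def spocitej_statistiku_alt (text : String) : Int × Int × Int :=
  if text == "" then (0, 0, 0)
  else
    let st := text.toList.foldl pvStepB (0, 1, 0, false)
    (st.2.1, st.2.2.1, st.1)

-- ===== PRECONDITION & SPEC =====
def Spec_spocitej_statistiku (text : String) (out : Int × Int × Int) : Prop := out = spocitej_statistiku_alt text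
instance (text : String) (out : Int × Int × Int) : Decidable (Spec_spocitej_statistiku text out) := by unfold Spec_spocitej_statistiku; infer_instance

-- ===== CLAIM (what is proved, stated in full; the proofs are below) =====
def Claim_equal_spocitej_statistiku : Prop := ∀ (text : String), Dom_spocitej_statistiku text → Spec_spocitej_statistiku text (spocitej_statistiku text)

-- ===== LEMMAS AND PROOFS =====

-- word count of cs given the in-word flag w (str.split() semantics)
def pvCountW : List Char → Bool → Int
  | [], _ => 0
  | c :: cs, w =>
    if PySem.Chars.isspace c then pvCountW cs false
    else if w then pvCountW cs true else 1 + pvCountW cs true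

-- newline count
def pvCountNL : List Char → Int
  | [] => 0
  | c :: cs => (if c == '\n' then 1 else 0) + pvCountNL cs

-- the in-word flag after processing cs
def pvEndW : List Char → Bool → Bool
  | [], w => w
  | c :: cs, _ => pvEndW cs (!(PySem.Chars.isspace c))

theorem pvA_len {α : Type} (cs : List α) : ∀ n : Int, cs.foldl (fun acc _ => acc + 1) n = n + cs.length := by
  induction cs with
  | nil => intro n; simp
  | cons c cs ih => intro n; simp [List.foldl, ih]; ring

theorem pvA_nl (cs : List Char) : ∀ n : Int,
    cs.foldl (fun acc znak => if znak == '\n' then acc + 1 else acc) n = n + pvCountNL cs := by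
  induction cs with
  | nil => intro n; simp [pvCountNL]
  | cons c cs ih =>
    intro n
    rw [List.foldl_cons]
    by_cases h : c == '\n'
    · rw [if_pos h, ih]; simp [pvCountNL, h]; ring
    · rw [if_neg h, ih]; simp [pvCountNL, h]

theorem pv_go_len (cs : List Char) : ∀ (cur : List Char) (acc : List (List Char)),
    ((PySem.Chars.split₀.go cs cur acc).length : Int) =
      acc.length + (if cur.isEmpty then pvCountW cs false else 1 + pvCountW cs true) := by
  induction cs with
  | nil =>
    intro cur acc
    by_cases h : cur.isEmpty <;> simp [PySem.Chars.split₀.go, pvCountW, h]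
  | cons c cs ih =>
    intro cur acc
    by_cases hs : PySem.Chars.isspace c
    · by_cases h : cur.isEmpty <;>
        simp [PySem.Chars.split₀.go, hs, h, ih, pvCountW] <;> ring
    · by_cases h : cur.isEmpty <;>
        simp [PySem.Chars.split₀.go, hs, h, ih, pvCountW]

theorem pv_split_len (cs : List Char) :
    ((PySem.Chars.split₀ cs).length : Int) = pvCountW cs false := by
  simpa using pv_go_len cs [] []

theorem pvB_fold (cs : List Char) : ∀ (z r s : Int) (w : Bool),
    cs.foldl pvStepB (z, r, s, w) =
      (z + cs.length, r + pvCountNL cs, s + pvCountW cs w, pvEndW cs w) := by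
  induction cs with
  | nil => intro z r s w; simp [pvCountNL, pvCountW, pvEndW]
  | cons c cs ih =>
    intro z r s w
    by_cases hs : PySem.Chars.isspace c
    · by_cases hn : c == '\n' <;>
        simp [List.foldl, pvStepB, hs, hn, ih, pvCountNL, pvCountW, pvEndW] <;> omega
    · have hn : ¬ (c == '\n') := by
        intro h; apply hs
        have : c = '\n' := by simpa using h
        subst this; decide
      cases w <;>
        simp [List.foldl, pvStepB, hs, hn, ih, pvCountNL, pvCountW, pvEndW] <;> omega

-- ===== VERDICT (by name: the statement is the Claim_ definition above) =====
theorem spocitej_statistiku_spec : Claim_equal_spocitej_statistiku := by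
  intro text _
  unfold Spec_spocitej_statistiku spocitej_statistiku spocitej_statistiku_alt
  by_cases h : text == ""
  · simp [h]
  · simp only [h, if_false, Bool.false_eq_true]
    rw [pvB_fold, pvA_nl, pvA_len, pvA_len]
    simp [PySem.Str.split₀, pv_split_len]
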